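-- pv_equiv track=rewrite | github.com/cloudtrends/godroid | sub_gene_comm.py | __is_go_file_has_part
-- ===== SOURCE A (Python) =====
-- def __is_go_file_has_part( contents_list , bstr, estr ):
--     b = False
--     e = False
--     for line in contents_list:
--         if line.startswith( bstr ):
--             b = True
--         if line.startswith( estr ):
--             e = True
--     if b and e:
--         return True
--     else:
--         return False
--     return False
-- ===== SOURCE B (Python) =====
-- def __is_go_file_has_part(contents_list, bstr, estr):
--     return any(line.startswith(bstr) for line in contents_list) and \
--            any(line.startswith(estr) for line in contents_list)
-- ===== Notes on version B (the rewrite author's own statement) =====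
-- stated objective: idiomatic
-- what changed: Replaces the single loop maintaining two mutable flags with two independent short-circuiting any() existence scans, one per prefix.
import Mathlib
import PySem

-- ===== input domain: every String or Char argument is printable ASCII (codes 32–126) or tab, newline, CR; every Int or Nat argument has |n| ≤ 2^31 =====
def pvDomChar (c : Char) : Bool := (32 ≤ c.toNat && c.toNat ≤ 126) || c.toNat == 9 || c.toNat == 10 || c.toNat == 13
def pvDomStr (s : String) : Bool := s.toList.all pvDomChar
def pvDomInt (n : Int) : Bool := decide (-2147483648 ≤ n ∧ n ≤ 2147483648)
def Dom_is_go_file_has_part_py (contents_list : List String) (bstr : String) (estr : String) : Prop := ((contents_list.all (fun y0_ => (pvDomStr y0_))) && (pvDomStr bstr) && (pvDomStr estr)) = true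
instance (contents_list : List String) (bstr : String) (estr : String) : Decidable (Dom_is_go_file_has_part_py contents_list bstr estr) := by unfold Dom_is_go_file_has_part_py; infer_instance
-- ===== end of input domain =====

-- ===== PORT A =====
-- B replaces A's single two-flag loop with two independent any() existence scans (idiomatic).
def is_go_file_has_part_py (contents_list : List String) (bstr : String) (estr : String) : Bool :=
  let r := contents_list.foldl
    (fun (st : Bool × Bool) line =>
      let st := if PySem.Str.startswith line bstr then (true, st.2) else st
      if PySem.Str.startswith line estr then (st.1, true) else st)
    (false, false)
  if r.1 && r.2 then true else false

-- ===== PORT B =====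
def is_go_file_has_part_py_alt (contents_list : List String) (bstr : String) (estr : String) : Bool :=
  (contents_list.any fun line => PySem.Str.startswith line bstr) &&
  (contents_list.any fun line => PySem.Str.startswith line estr)

-- ===== PRECONDITION & SPEC =====
def Spec_is_go_file_has_part_py (contents_list : List String) (bstr : String) (estr : String) (out : Bool) : Prop := out = is_go_file_has_part_py_alt contents_list bstr estr
instance (contents_list : List String) (bstr : String) (estr : String) (out : Bool) : Decidable (Spec_is_go_file_has_part_py contents_list bstr estr out) := by unfold Spec_is_go_file_has_part_py; infer_instance

-- ===== CLAIM (what is proved, stated in full; the proofs are below) =====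
def Claim_equal_is_go_file_has_part_py : Prop := ∀ (contents_list : List String) (bstr : String) (estr : String), Dom_is_go_file_has_part_py contents_list bstr estr → Spec_is_go_file_has_part_py contents_list bstr estr (is_go_file_has_part_py contents_list bstr estr)

-- ===== LEMMAS AND PROOFS =====

-- ===== VERDICT (by name: the statement is the Claim_ definition above) =====
lemma flags_loop (contents_list : List String) (bstr estr : String) (b e : Bool) :
    contents_list.foldl
      (fun (st : Bool × Bool) line =>
        let st := if PySem.Str.startswith line bstr then (true, st.2) else st
        if PySem.Str.startswith line estr then (st.1, true) else st)
      (b, e)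
    = (b || contents_list.any (fun line => PySem.Str.startswith line bstr),
       e || contents_list.any (fun line => PySem.Str.startswith line estr)) := by
  induction contents_list generalizing b e with
  | nil => simp
  | cons x xs ih =>
    simp only [List.foldl_cons, List.any_cons]
    cases hb : PySem.Str.startswith x bstr <;>
      cases he : PySem.Str.startswith x estr <;>
      simp only [hb, if_true, Bool.false_or, Bool.true_or, ih] <;> simp

theorem is_go_file_has_part_py_spec : Claim_equal_is_go_file_has_part_py := by
  intro contents_list bstr estr _
  unfold Spec_is_go_file_has_part_py is_go_file_has_part_py is_go_file_has_part_py_alt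
  rw [flags_loop]
  simp only [Bool.false_or]
  cases (contents_list.any fun line => PySem.Str.startswith line bstr) <;>
    cases (contents_list.any fun line => PySem.Str.startswith line estr) <;> rfl
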